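-- pv_equiv track=rewrite | github.com/venkatesh2100/CODEWITHVENKY | LeetcodeDaily/train/uniformstring.py | weightedUniformStrings
-- ===== SOURCE A (Python) =====
-- def weightedUniformStrings(s, queries):
--     # Calculate uniform substring weights
--     uniform_weights = set()
--     prev_char = ''
--     count = 0
--
--     for char in s:
--         if char == prev_char:
--             count += 1
--         else:
--             count = 1
--         uniform_weights.add(count * (ord(char) - ord('a') + 1))
--         prev_char = char
--
--     # Process queries
--     result = ["Yes" if query in uniform_weights else "No" for query in queries]
--     return result
-- ===== SOURCE B (Python) =====
-- def weightedUniformStrings(s, queries):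
--     # Run-length decomposition: collapse s into maximal runs, then expand each
--     # run of c with length L into the weights {k*(ord(c)-96) : 1 <= k <= L}.
--     weights = set()
--     i, n = 0, len(s)
--     while i < n:
--         j = i
--         while j < n and s[j] == s[i]:
--             j += 1
--         w = ord(s[i]) - ord('a') + 1
--         weights.update(w * k for k in range(1, j - i + 1))
--         i = j
--     return ["Yes" if q in weights else "No" for q in queries]
-- ===== Notes on version B (the rewrite author's own statement) =====
-- stated objective: alternative
-- what changed: Replaces A's per-character prev_char/count state machine with a run-length decomposition: split s into maximal runs of equal characters and expand each run of c with length L into the weight multiples w(c)*k for k=1..L; queries are then answered by the same set membership.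
import Mathlib
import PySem

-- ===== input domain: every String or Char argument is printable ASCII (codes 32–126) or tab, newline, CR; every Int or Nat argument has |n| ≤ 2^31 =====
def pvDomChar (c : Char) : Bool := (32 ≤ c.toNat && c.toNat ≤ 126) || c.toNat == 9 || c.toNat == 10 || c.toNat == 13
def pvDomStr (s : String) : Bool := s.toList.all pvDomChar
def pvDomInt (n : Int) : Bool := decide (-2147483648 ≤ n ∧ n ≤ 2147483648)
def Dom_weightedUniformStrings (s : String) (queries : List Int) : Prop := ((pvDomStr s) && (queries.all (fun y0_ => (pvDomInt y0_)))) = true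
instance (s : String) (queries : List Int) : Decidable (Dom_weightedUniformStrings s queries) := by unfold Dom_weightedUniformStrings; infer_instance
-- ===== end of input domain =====

-- B replaces A's prev_char/count state machine with a run-length decomposition of s (alternative decomposition, same cost).


-- ===== PORT A =====
-- one step of A's loop body: count resets unless the char equals prev_char
def stepA (st : PySem.Set Int × Option Char × Int) (c : Char) : PySem.Set Int × Option Char × Int :=
  let count : Int := if st.2.1 = some c then st.2.2 + 1 else 1
  (PySem.Set.add st.1 (count * ((c.toNat : Int) - 97 + 1)), some c, count)

def weightedUniformStrings (s : String) (queries : List Int) : List String :=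
  let st := s.toList.foldl stepA (PySem.Set.empty, none, 0)
  queries.map (fun q => if PySem.Set.contains st.1 q then "Yes" else "No")

-- ===== PORT B =====
-- B's outer while loop: strip the maximal run of the leading char, add its weight multiples
def bWeights : List Char → PySem.Set Int → PySem.Set Int
  | [], acc => acc
  | c :: rest, acc =>
    let run := rest.takeWhile (· == c)
    let w : Int := (c.toNat : Int) - 97 + 1
    bWeights (rest.drop run.length)
      (PySem.Set.update acc ((PySem.List.pyRange 1 ((run.length : Int) + 2) 1).map (fun k => w * k)))
termination_by l _ => l.length
decreasing_by simp

def weightedUniformStrings_alt (s : String) (queries : List Int) : List String :=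
  let weights := bWeights s.toList PySem.Set.empty
  queries.map (fun q => if PySem.Set.contains weights q then "Yes" else "No")

-- ===== PRECONDITION & SPEC =====
def Spec_weightedUniformStrings (s : String) (queries : List Int) (out : List String) : Prop := out = weightedUniformStrings_alt s queries
instance (s : String) (queries : List Int) (out : List String) : Decidable (Spec_weightedUniformStrings s queries out) := by unfold Spec_weightedUniformStrings; infer_instance

-- ===== CLAIM (what is proved, stated in full; the proofs are below) =====
def Claim_equal_weightedUniformStrings : Prop := ∀ (s : String) (queries : List Int), Dom_weightedUniformStrings s queries → Spec_weightedUniformStrings s queries (weightedUniformStrings s queries)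

-- ===== LEMMAS AND PROOFS =====
-- the pure list of weights B collects, following bWeights' recursion
def genW : List Char → List Int
  | [] => []
  | c :: rest =>
    (PySem.List.pyRange 1 (((rest.takeWhile (· == c)).length : Int) + 2) 1).map
        (fun k => ((c.toNat : Int) - 97 + 1) * k)
      ++ genW (rest.drop (rest.takeWhile (· == c)).length)
termination_by l => l.length
decreasing_by simp

theorem drop_length_takeWhile (p : Char → Bool) : ∀ (l : List Char), l.drop (l.takeWhile p).length = l.dropWhile p := by
  intro l
  induction l with
  | nil => simp
  | cons a l ih =>
    by_cases h : p a
    · simp [h, ih]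
    · simp [h]

theorem mem_bWeights : ∀ (n : ℕ) (l : List Char), l.length ≤ n →
    ∀ (acc : PySem.Set Int) (x : Int), x ∈ bWeights l acc ↔ x ∈ acc ∨ x ∈ genW l := by
  intro n
  induction n with
  | zero =>
    intro l hl acc x
    have : l = [] := List.length_eq_zero_iff.mp (Nat.le_zero.mp hl)
    subst this; simp [bWeights, genW]
  | succ n ih =>
    intro l hl acc x
    match l with
    | [] => simp [bWeights, genW]
    | c :: rest =>
      rw [bWeights, genW]
      rw [ih (rest.drop (rest.takeWhile (· == c)).length)
        (by simp at hl ⊢; omega) _ x]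
      simp only [PySem.Set.mem_update, List.mem_append]
      tauto

-- processing a run of characters all equal to prev_char: counts climb, state stays on c
theorem A_run : ∀ (run : List Char) (c : Char), (∀ y ∈ run, y = c) →
    ∀ (acc : PySem.Set Int) (cnt : Int),
    (run.foldl stepA (acc, some c, cnt)).2 = (some c, cnt + run.length) ∧
    ∀ x, x ∈ (run.foldl stepA (acc, some c, cnt)).1 ↔
      x ∈ acc ∨ ∃ i : ℕ, i < run.length ∧ x = (cnt + 1 + i) * ((c.toNat : Int) - 97 + 1) := by
  intro run
  induction run with
  | nil => intro c _ acc cnt; simp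
  | cons a run' ih =>
    intro c h acc cnt
    have ha : a = c := h a (by simp)
    subst ha
    have hrest : ∀ y ∈ run', y = a := fun y hy => h y (by simp [hy])
    have step1 : stepA (acc, some a, cnt) a
        = (PySem.Set.add acc ((cnt + 1) * ((a.toNat : Int) - 97 + 1)), some a, cnt + 1) := by
      simp [stepA]
    rw [List.foldl_cons, step1]
    obtain ⟨h2, h1⟩ := ih a hrest (PySem.Set.add acc ((cnt + 1) * ((a.toNat : Int) - 97 + 1))) (cnt + 1)
    refine ⟨by rw [h2]; simp; ring, ?_⟩
    intro x
    rw [h1 x, PySem.Set.mem_add]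
    constructor
    · rintro (⟨hx | hx⟩ | ⟨i, hi, hx⟩)
      · exact Or.inl hx
      · exact Or.inr ⟨0, by simp, by simpa using hx⟩
      · exact Or.inr ⟨i + 1, by simp; omega, by rw [hx]; push_cast; ring⟩
    · rintro (hx | ⟨i, hi, hx⟩)
      · exact Or.inl (Or.inl hx)
      · match i with
        | 0 => exact Or.inl (Or.inr (by simpa using hx))
        | i + 1 =>
          refine Or.inr ⟨i, by simp at hi ⊢; omega, ?_⟩
          rw [hx]; push_cast; ring

-- A's fold, started with a prev_char different from the leading char, collects exactly genW
theorem A_gen : ∀ (n : ℕ) (l : List Char), l.length ≤ n →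
    ∀ (prev : Option Char) (cnt : Int) (acc : PySem.Set Int),
    (∀ c rest, l = c :: rest → prev ≠ some c) →
    ∀ x, x ∈ (l.foldl stepA (acc, prev, cnt)).1 ↔ x ∈ acc ∨ x ∈ genW l := by
  intro n
  induction n with
  | zero =>
    intro l hl prev cnt acc _ x
    have : l = [] := List.length_eq_zero_iff.mp (Nat.le_zero.mp hl)
    subst this; simp [genW]
  | succ n ih =>
    intro l hl prev cnt acc hfresh x
    match l with
    | [] => simp [genW]
    | c :: rest =>
      have step1 : stepA (acc, prev, cnt) c
          = (PySem.Set.add acc (1 * ((c.toNat : Int) - 97 + 1)), some c, 1) := by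
        simp [stepA, hfresh c rest rfl]
      rw [List.foldl_cons, step1]
      -- split rest into the run and the remainder
      have hsplit : rest = rest.takeWhile (· == c) ++ rest.dropWhile (· == c) :=
        (List.takeWhile_append_dropWhile).symm
      have hdrop : rest.drop (rest.takeWhile (· == c)).length = rest.dropWhile (· == c) :=
        drop_length_takeWhile (· == c) rest
      have hrun : ∀ y ∈ rest.takeWhile (· == c), y = c := by
        intro y hy
        have := List.mem_takeWhile_imp hy
        simpa using this
      set run := rest.takeWhile (· == c) with hrundef
      set rest' := rest.dropWhile (· == c) with hrest'
      conv_lhs => rw [hsplit, List.foldl_append]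
      obtain ⟨h2, h1⟩ := A_run run c hrun (PySem.Set.add acc (1 * ((c.toNat : Int) - 97 + 1))) 1
      set T := run.foldl stepA (PySem.Set.add acc (1 * ((c.toNat : Int) - 97 + 1)), some c, 1) with hT
      have hTeta : T = (T.1, T.2.1, T.2.2) := rfl
      have hT2 : T.2 = (some c, 1 + (run.length : Int)) := h2
      have hfresh' : ∀ c' r', rest' = c' :: r' → T.2.1 ≠ some c' := by
        intro c' r' hr
        rw [hT2]
        simp only [ne_eq, Option.some.injEq]
        intro hcc
        subst hcc
        have : ¬ (c == c) = true := by
          have := List.head?_dropWhile_not (· == c) rest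
          rw [← hrest', hr] at this
          simpa using this
        simp at this
      have hlen : rest'.length ≤ n := by
        simp at hl
        have : run.length + rest'.length = rest.length := by
          conv_rhs => rw [hsplit]
          simp [hrundef]
        omega
      rw [hTeta, ih rest' hlen T.2.1 T.2.2 T.1 hfresh' x]
      rw [h1 x, PySem.Set.mem_add]
      rw [genW]
      simp only [List.mem_append, List.mem_map, PySem.List.mem_pyRange_one, ← hrundef, ← hdrop]
      constructor
      · rintro (((hx | hx) | ⟨i, hi, hx⟩) | hx)
        · exact Or.inl hx
        · exact Or.inr (Or.inl ⟨1, ⟨by omega, by omega⟩, by rw [hx]; ring⟩)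
        · refine Or.inr (Or.inl ⟨1 + 1 + i, ⟨by omega, by push_cast; omega⟩, by rw [hx]; ring⟩)
        · exact Or.inr (Or.inr hx)
      · rintro (hx | ⟨k, ⟨hk1, hk2⟩, hx⟩ | hx)
        · exact Or.inl (Or.inl (Or.inl hx))
        · by_cases hk : k = 1
          · subst hk
            exact Or.inl (Or.inl (Or.inr (by rw [← hx]; ring)))
          · refine Or.inl (Or.inr ⟨(k - 2).toNat, by omega, ?_⟩)
            rw [← hx]
            have : ((k - 2).toNat : Int) = k - 2 := by omega
            rw [this]; ring
        · exact Or.inr hx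

theorem sets_agree (s : String) (x : Int) :
    x ∈ (s.toList.foldl stepA (PySem.Set.empty, none, 0)).1 ↔ x ∈ bWeights s.toList PySem.Set.empty := by
  rw [A_gen s.toList.length s.toList le_rfl none 0 PySem.Set.empty (by intro c r _; simp) x]
  rw [mem_bWeights s.toList.length s.toList le_rfl PySem.Set.empty x]

-- ===== VERDICT (by name: the statement is the Claim_ definition above) =====
theorem weightedUniformStrings_spec : Claim_equal_weightedUniformStrings := by
  intro s queries _
  unfold Spec_weightedUniformStrings weightedUniformStrings weightedUniformStrings_alt
  apply List.map_congr_left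
  intro q _
  have h := sets_agree s q
  by_cases hq : q ∈ (s.toList.foldl stepA (PySem.Set.empty, none, 0)).1
  · rw [if_pos ((PySem.Set.contains_iff _ _).mpr hq), if_pos ((PySem.Set.contains_iff _ _).mpr (h.mp hq))]
  · have hq' : q ∉ bWeights s.toList PySem.Set.empty := fun hc => hq (h.mpr hc)
    rw [if_neg (fun hc => hq ((PySem.Set.contains_iff _ _).mp hc)),
        if_neg (fun hc => hq' ((PySem.Set.contains_iff _ _).mp hc))]
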